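-- pv_equiv track=rewrite | github.com/MdAbedin/binarysearch | 0497 ABC Subsequences.py | solve
-- ===== SOURCE A (Python) =====
-- def solve(s):
--     As = [0]
--
--     for i,char in enumerate(s):
--         As.append(As[-1] + (1 if char == "a" else 0))
--
--     As = As[1:]
--     Cs = [0]
--
--     for i,char in enumerate(s[::-1]):
--         Cs.append(Cs[-1] + (1 if char == "c" else 0))
--
--     Cs.reverse()
--     Cs = Cs[:-1]
--
--     B_locs = list(filter(lambda x: s[x] == "b", range(len(s))))
--     ans = 0
--     coeff = 0
--
--     for i in range(len(B_locs)):
--         ans += (2**As[B_locs[i]] - 1) * (2**Cs[B_locs[i]] - 1)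
--
--         ans += coeff * (2**Cs[B_locs[i]] - 1)
--         coeff *= 2
--         coeff += 2**As[B_locs[i]] - 1
--
--     return ans
-- ===== SOURCE B (Python) =====
-- def solve(s):
--     fa = fb = fc = 0
--     for ch in s:
--         if ch == "a":
--             fa = 2 * fa + 1
--         elif ch == "b":
--             fb = 2 * fb + fa
--         elif ch == "c":
--             fc = 2 * fc + fb
--     return fc
-- ===== Notes on version B (the rewrite author's own statement) =====
-- stated objective: faster
-- what changed: Replaced the prefix/suffix count arrays, the b-position filter and the 2**k power computations with a single forward pass maintaining three accumulators fa, fb, fc updated per character.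
import Mathlib
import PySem

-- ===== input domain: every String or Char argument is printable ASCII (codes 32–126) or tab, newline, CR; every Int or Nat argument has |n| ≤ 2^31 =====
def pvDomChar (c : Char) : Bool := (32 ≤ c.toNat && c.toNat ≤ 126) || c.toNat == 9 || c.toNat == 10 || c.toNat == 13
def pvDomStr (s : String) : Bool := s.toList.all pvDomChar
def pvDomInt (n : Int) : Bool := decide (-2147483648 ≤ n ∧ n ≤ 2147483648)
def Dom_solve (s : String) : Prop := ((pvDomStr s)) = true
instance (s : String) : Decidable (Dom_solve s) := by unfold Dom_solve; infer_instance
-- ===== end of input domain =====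

-- B replaces A's prefix/suffix count arrays, b-position filter and repeated 2**k powers with a
-- single forward pass over the string keeping three accumulators (objective: faster by constants).

-- ===== PORT A =====
-- literal port of Source A: prefix array As of 'a'-counts, suffix array Cs of 'c'-counts
-- (s[::-1] is List.reverse, cf. PySem.List.slice?_none_none_neg_one; Python's list.reverse()
-- and list(...) reversal are the same reversal), list of b positions, then the coeff loop.
-- The exponents As[...]/Cs[...] are always ≥ 0, so 2**e is (2:Int) ^ e.toNat exactly.
def solve (s : String) : Int :=
  let cs := s.toList
  -- As = [0]; for i,char in enumerate(s): As.append(As[-1] + (1 if char == "a" else 0))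
  let As := cs.foldl (fun (acc : List Int) ch =>
    acc ++ [PySem.List.pyGetD acc (-1) 0 + (if ch = 'a' then 1 else 0)]) [0]
  -- As = As[1:]
  let As := PySem.List.slice As (some 1) none
  -- Cs = [0]; for i,char in enumerate(s[::-1]): Cs.append(Cs[-1] + (1 if char == "c" else 0))
  let Cs := cs.reverse.foldl (fun (acc : List Int) ch =>
    acc ++ [PySem.List.pyGetD acc (-1) 0 + (if ch = 'c' then 1 else 0)]) [0]
  -- Cs.reverse()
  let Cs := Cs.reverse
  -- Cs = Cs[:-1]
  let Cs := PySem.List.slice Cs none (some (-1))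
  -- B_locs = list(filter(lambda x: s[x] == "b", range(len(s))))
  let Blocs := (PySem.List.pyRange 0 cs.length 1).filter
    (fun x => PySem.List.pyGet? cs x == some 'b')
  -- ans = 0; coeff = 0; for i in range(len(B_locs)): ...
  let r := (PySem.List.pyRange 0 Blocs.length 1).foldl (fun (st : Int × Int) i =>
      let p := PySem.List.pyGetD Blocs i 0
      let ans := st.1 + ((2:Int) ^ (PySem.List.pyGetD As p 0).toNat - 1)
                        * ((2:Int) ^ (PySem.List.pyGetD Cs p 0).toNat - 1)
      let ans := ans + st.2 * ((2:Int) ^ (PySem.List.pyGetD Cs p 0).toNat - 1)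
      let coeff := st.2 * 2
      let coeff := coeff + ((2:Int) ^ (PySem.List.pyGetD As p 0).toNat - 1)
      (ans, coeff)) ((0:Int), (0:Int))
  r.1

-- ===== PORT B =====
-- literal port of Source B: one fold with state (fa, fb, fc)
def solve_alt (s : String) : Int :=
  let r := s.toList.foldl (fun (st : Int × Int × Int) ch =>
    if ch = 'a' then (2 * st.1 + 1, st.2.1, st.2.2)
    else if ch = 'b' then (st.1, 2 * st.2.1 + st.1, st.2.2)
    else if ch = 'c' then (st.1, st.2.1, 2 * st.2.2 + st.2.1)
    else st) ((0:Int), (0:Int), (0:Int))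
  r.2.2

-- ===== PRECONDITION & SPEC =====
def Spec_solve (s : String) (out : Int) : Prop := out = solve_alt s
instance (s : String) (out : Int) : Decidable (Spec_solve s out) := by unfold Spec_solve; infer_instance

-- ===== CLAIM (what is proved, stated in full; the proofs are below) =====
def Claim_equal_solve : Prop := ∀ (s : String), Dom_solve s → Spec_solve s (solve s)

-- ===== LEMMAS AND PROOFS =====

-- proof-side abbreviations and the mathematical model of A's b-loop
def pvInd (c : Char) (x : Char) : Int := if x = c then 1 else 0
def pvScan (c : Char) (ds : List Char) : List Int :=
  ds.foldl (fun (acc : List Int) ch => acc ++ [PySem.List.pyGetD acc (-1) 0 + pvInd c ch]) [0]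
def pvW (c : Char) (ds : List Char) (k : Nat) : Int := ((ds.take k).map (pvInd c)).sum
def pvC (cs : List Char) (k : Nat) : Int := ((cs.drop k).map (pvInd 'c')).sum
def pvBpos (cs : List Char) : List Nat :=
  (List.range cs.length).filter (fun k => cs.getD k ' ' == 'b')
def pvMStep (cs : List Char) (st : Int × Int) (k : Nat) : Int × Int :=
  (st.1 + ((2:Int) ^ (pvW 'a' cs (k + 1)).toNat - 1) * ((2:Int) ^ (pvC cs k).toNat - 1)
        + st.2 * ((2:Int) ^ (pvC cs k).toNat - 1),
   st.2 * 2 + ((2:Int) ^ (pvW 'a' cs (k + 1)).toNat - 1))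
def pvLoop (cs : List Char) : Int × Int := (pvBpos cs).foldl (pvMStep cs) (0, 0)
def pvStep (st : Int × Int × Int) (ch : Char) : Int × Int × Int :=
  if ch = 'a' then (2 * st.1 + 1, st.2.1, st.2.2)
  else if ch = 'b' then (st.1, 2 * st.2.1 + st.1, st.2.2)
  else if ch = 'c' then (st.1, st.2.1, 2 * st.2.2 + st.2.1)
  else st
def pvF (cs : List Char) : Int × Int × Int := cs.foldl pvStep (0, 0, 0)

lemma pvScan_eq (c : Char) (ds : List Char) :
    pvScan c ds = (List.range (ds.length + 1)).map (pvW c ds) := by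
  induction ds using List.reverseRecOn with
  | nil => simp [pvScan, pvW]
  | append_singleton ds x ih =>
    have hstep : pvScan c (ds ++ [x])
        = pvScan c ds ++ [PySem.List.pyGetD (pvScan c ds) (-1) 0 + pvInd c x] := by
      simp [pvScan, List.foldl_append]
    have hlast : PySem.List.pyGetD ((List.range (ds.length + 1)).map (pvW c ds)) (-1) 0
        = pvW c ds ds.length := by
      have : (List.range (ds.length + 1)).map (pvW c ds)
          = (List.range ds.length).map (pvW c ds) ++ [pvW c ds ds.length] := by
        rw [List.range_succ, List.map_append]; rfl
      rw [this, PySem.List.pyGetD_neg_one_append_singleton]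
    have hmap : (List.range (ds.length + 1)).map (pvW c (ds ++ [x]))
        = (List.range (ds.length + 1)).map (pvW c ds) := by
      apply List.map_congr_left
      intro k hk
      rw [List.mem_range] at hk
      unfold pvW
      rw [List.take_append_of_le_length (by omega)]
    have hnew : pvW c (ds ++ [x]) (ds.length + 1) = pvW c ds ds.length + pvInd c x := by
      unfold pvW
      rw [List.take_of_length_le (by simp), List.take_of_length_le (by omega)]
      simp
    rw [hstep, ih, hlast]
    have h2 : (ds ++ [x]).length + 1 = (ds.length + 1) + 1 := by simp
    rw [h2]
    conv_rhs => rw [List.range_succ, List.map_append, hmap]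
    simp [hnew]

lemma pvRevMapRange {β : Type} (f : Nat → β) (n : Nat) :
    ((List.range n).map f).reverse = (List.range n).map (fun k => f (n - 1 - k)) := by
  induction n generalizing f with
  | zero => simp
  | succ n ih =>
    conv_lhs => rw [List.range_succ, List.map_append, List.reverse_append]
    conv_rhs => rw [List.range_succ_eq_map]
    rw [ih]
    simp only [List.map_cons, List.map_nil, List.reverse_cons, List.reverse_nil,
      List.nil_append, List.map_map, List.cons_append]
    have h0 : n + 1 - 1 - 0 = n := by omega
    rw [h0]
    refine congrArg _ ?_
    apply List.map_congr_left
    intro k hk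
    rw [List.mem_range] at hk
    simp only [Function.comp_apply]
    congr 1
    omega

def pvPortStep (Asl Csl : List Int) (st : Int × Int) (p : Int) : Int × Int :=
  let ans := st.1 + ((2:Int) ^ (PySem.List.pyGetD Asl p 0).toNat - 1)
                    * ((2:Int) ^ (PySem.List.pyGetD Csl p 0).toNat - 1)
  let ans := ans + st.2 * ((2:Int) ^ (PySem.List.pyGetD Csl p 0).toNat - 1)
  let coeff := st.2 * 2
  let coeff := coeff + ((2:Int) ^ (PySem.List.pyGetD Asl p 0).toNat - 1)
  (ans, coeff)

lemma solve_eq_loop (s : String) : solve s = (pvLoop s.toList).1 := by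
  simp only [solve]
  set cs := s.toList with hcs
  set n := cs.length with hn
  have hAs : PySem.List.slice (cs.foldl (fun (acc : List Int) ch =>
        acc ++ [PySem.List.pyGetD acc (-1) 0 + (if ch = 'a' then 1 else 0)]) [0]) (some 1) none
      = (List.range n).map (fun k => pvW 'a' cs (k + 1)) := by
    show PySem.List.slice (pvScan 'a' cs) (some 1) none = _
    rw [pvScan_eq, PySem.List.slice_from_one, List.range_succ_eq_map,
      List.map_cons, List.tail_cons, List.map_map, ← hn]
    apply List.map_congr_left
    intro k _
    rfl
  have hCs : PySem.List.slice ((cs.reverse.foldl (fun (acc : List Int) ch =>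
        acc ++ [PySem.List.pyGetD acc (-1) 0 + (if ch = 'c' then 1 else 0)]) [0]).reverse)
        none (some (-1))
      = (List.range n).map (pvC cs) := by
    show PySem.List.slice ((pvScan 'c' cs.reverse).reverse) none (some (-1)) = _
    rw [pvScan_eq, PySem.List.slice_to_neg_one, List.dropLast_reverse]
    rw [List.length_reverse, List.range_succ_eq_map]
    show ((List.map (pvW 'c' cs.reverse) (List.map Nat.succ (List.range n)))).reverse = _
    rw [List.map_map, pvRevMapRange]
    apply List.map_congr_left
    intro k hk
    rw [List.mem_range] at hk
    show pvW 'c' cs.reverse (Nat.succ (n - 1 - k)) = pvC cs k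
    have h1 : Nat.succ (n - 1 - k) = n - k := by omega
    rw [h1]
    unfold pvW pvC
    rw [List.take_reverse, ← hn]
    have h2 : n - (n - k) = k := by omega
    rw [h2, List.map_reverse, List.sum_reverse]
  have hB : (PySem.List.pyRange 0 (n : Int) 1).filter
        (fun x => PySem.List.pyGet? cs x == some 'b')
      = List.map (fun k : Nat => (k : Int)) (pvBpos cs) := by
    rw [PySem.List.pyRange_zero_nat, List.filter_map]
    refine congrArg _ ?_
    unfold pvBpos
    rw [← hn]
    apply List.filter_congr
    intro k hk
    rw [List.mem_range] at hk
    simp only [Function.comp_apply, PySem.List.pyGet?_natCast]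
    rw [List.getElem?_eq_getElem (by omega), List.getD_eq_getElem _ _ (by omega)]
    simp
  rw [hAs, hCs, hB]
  show (List.foldl
      (fun (st : Int × Int) i => pvPortStep ((List.range n).map (fun k => pvW 'a' cs (k + 1)))
        ((List.range n).map (pvC cs)) st
        (PySem.List.pyGetD (List.map (fun k : Nat => (k : Int)) (pvBpos cs)) i 0))
      ((0:Int), (0:Int))
      (PySem.List.pyRange 0 ((List.map (fun k : Nat => (k : Int)) (pvBpos cs)).length : Int) 1)).1
    = (pvLoop cs).1
  rw [PySem.List.foldl_pyRange_zero_pyGetD', List.foldl_map]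
  unfold pvLoop
  refine congrArg Prod.fst (PySem.List.foldl_congr_mem _ _ _ _ ?_)
  intro st k hk
  have hkn : k < n := by
    have := (List.mem_filter.mp hk).1
    rwa [List.mem_range] at this
  show pvPortStep _ _ st (k : Int) = pvMStep cs st k
  unfold pvPortStep pvMStep
  simp only [PySem.List.pyGetD_natCast]
  rw [PySem.List.getD_map_range _ _ _ _ hkn, PySem.List.getD_map_range _ _ _ _ hkn]


lemma pvW_nonneg (c : Char) (ds : List Char) (k : Nat) : 0 ≤ pvW c ds k := by
  apply List.sum_nonneg
  intro x hx
  rcases List.mem_map.mp hx with ⟨y, _, rfl⟩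
  unfold pvInd
  split <;> norm_num

lemma pvC_nonneg (cs : List Char) (k : Nat) : 0 ≤ pvC cs k := by
  apply List.sum_nonneg
  intro x hx
  rcases List.mem_map.mp hx with ⟨y, _, rfl⟩
  unfold pvInd
  split <;> norm_num

lemma pvW_last (c : Char) (ds : List Char) (x : Char) :
    pvW c (ds ++ [x]) (ds.length + 1) = pvW c ds ds.length + pvInd c x := by
  unfold pvW
  rw [List.take_of_length_le (by simp), List.take_of_length_le (by omega)]
  simp

lemma pvW_take (c : Char) (ds : List Char) (x : Char) (k : Nat) (h : k ≤ ds.length) :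
    pvW c (ds ++ [x]) k = pvW c ds k := by
  unfold pvW
  rw [List.take_append_of_le_length h]

lemma pvC_snoc (cs : List Char) (x : Char) (k : Nat) (h : k ≤ cs.length) :
    pvC (cs ++ [x]) k = pvC cs k + pvInd 'c' x := by
  unfold pvC
  rw [List.drop_append_of_le_length h, List.map_append, List.sum_append]
  simp

lemma pvF_append (cs : List Char) (x : Char) : pvF (cs ++ [x]) = pvStep (pvF cs) x := by
  simp [pvF, List.foldl_append]

lemma pvF_fa (cs : List Char) : (pvF cs).1 = (2:Int) ^ (pvW 'a' cs cs.length).toNat - 1 := by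
  induction cs using List.reverseRecOn with
  | nil => simp [pvF, pvW]
  | append_singleton cs x ih =>
    rw [pvF_append]
    have hlen : (cs ++ [x]).length = cs.length + 1 := by simp
    rw [hlen, pvW_last]
    by_cases hx : x = 'a'
    · subst hx
      have hnn := pvW_nonneg 'a' cs cs.length
      have ht : (pvW 'a' cs cs.length + pvInd 'a' 'a').toNat
          = (pvW 'a' cs cs.length).toNat + 1 := by
        unfold pvInd; simp; omega
      rw [ht, pow_succ]
      simp [pvStep, ih]
      ring
    · have ht : pvInd 'a' x = 0 := by unfold pvInd; simp [hx]
      rw [ht, add_zero]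
      have h1 : (pvStep (pvF cs) x).1 = (pvF cs).1 := by
        unfold pvStep
        split_ifs <;> simp_all
      rw [h1, ih]

lemma pvBpos_lt (cs : List Char) (k : Nat) (hk : k ∈ pvBpos cs) : k < cs.length := by
  have := (List.mem_filter.mp hk).1
  rwa [List.mem_range] at this

lemma pvBpos_append (cs : List Char) (x : Char) :
    pvBpos (cs ++ [x]) = pvBpos cs ++ (if x = 'b' then [cs.length] else []) := by
  unfold pvBpos
  have hlen : (cs ++ [x]).length = cs.length + 1 := by simp
  rw [hlen, List.range_succ, List.filter_append]
  congr 1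
  · apply List.filter_congr
    intro k hk
    rw [List.mem_range] at hk
    rw [List.getD_append _ _ _ _ hk]
  · by_cases hx : x = 'b'
    · subst hx
      simp [List.filter]
    · have hb : (x == 'b') = false := by simp [hx]
      simp [List.filter, hb, hx]

lemma pvDouble (l : List Nat) (fa g : Nat → Int) (a k : Int) :
    l.foldl (fun st p => (st.1 + fa p * (2 * g p + 1) + st.2 * (2 * g p + 1),
                          st.2 * 2 + fa p)) (2 * a + k, k)
    = (2 * (l.foldl (fun st p => (st.1 + fa p * g p + st.2 * g p, st.2 * 2 + fa p)) (a, k)).1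
         + (l.foldl (fun st p => (st.1 + fa p * g p + st.2 * g p, st.2 * 2 + fa p)) (a, k)).2,
       (l.foldl (fun st p => (st.1 + fa p * g p + st.2 * g p, st.2 * 2 + fa p)) (a, k)).2) := by
  induction l generalizing a k with
  | nil => simp
  | cons p l ih =>
    simp only [List.foldl_cons]
    have h1 : ((2 * a + k + fa p * (2 * g p + 1) + k * (2 * g p + 1), k * 2 + fa p) : Int × Int)
        = (2 * (a + fa p * g p + k * g p) + (k * 2 + fa p), k * 2 + fa p) := by
      rw [Prod.mk.injEq]
      constructor <;> ring
    rw [h1]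
    exact ih _ _

lemma pvMStep_snoc_ne_c (cs : List Char) (x : Char) (hx : x ≠ 'c') (st : Int × Int)
    (k : Nat) (hk : k < cs.length) : pvMStep (cs ++ [x]) st k = pvMStep cs st k := by
  unfold pvMStep
  rw [pvW_take _ _ _ _ (by omega), pvC_snoc _ _ _ (by omega)]
  have h0 : pvInd 'c' x = 0 := by unfold pvInd; simp [hx]
  rw [h0, add_zero]

lemma pvLoop_eq (cs : List Char) : pvLoop cs = ((pvF cs).2.2, (pvF cs).2.1) := by
  induction cs using List.reverseRecOn with
  | nil => simp [pvLoop, pvBpos, pvF]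
  | append_singleton cs x ih =>
    rw [pvF_append]
    unfold pvLoop
    rw [pvBpos_append, List.foldl_append]
    by_cases hc : x = 'c'
    · subst hc
      rw [if_neg (by decide), List.foldl_nil]
      have hcong : (pvBpos cs).foldl (pvMStep (cs ++ ['c'])) ((0:Int), (0:Int))
          = (pvBpos cs).foldl (fun (st : Int × Int) p =>
              (st.1 + ((2:Int) ^ (pvW 'a' cs (p + 1)).toNat - 1)
                      * (2 * ((2:Int) ^ (pvC cs p).toNat - 1) + 1)
                    + st.2 * (2 * ((2:Int) ^ (pvC cs p).toNat - 1) + 1),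
               st.2 * 2 + ((2:Int) ^ (pvW 'a' cs (p + 1)).toNat - 1)))
            (2 * 0 + 0, 0) := by
        rw [show ((2:Int) * 0 + 0, (0:Int)) = ((0:Int), (0:Int)) by norm_num]
        apply PySem.List.foldl_congr_mem
        intro st k hk
        have hkn : k < cs.length := pvBpos_lt cs k hk
        unfold pvMStep
        rw [pvW_take _ _ _ _ (by omega), pvC_snoc _ _ _ (by omega)]
        have h1 : pvInd 'c' 'c' = 1 := by unfold pvInd; simp
        have h2 : (pvC cs k + 1).toNat = (pvC cs k).toNat + 1 := by
          have := pvC_nonneg cs k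
          omega
        rw [h1, h2, pow_succ, Prod.mk.injEq]
        constructor <;> ring
      rw [hcong, pvDouble]
      have hfold : (pvBpos cs).foldl (fun (st : Int × Int) p =>
            (st.1 + ((2:Int) ^ (pvW 'a' cs (p + 1)).toNat - 1) * ((2:Int) ^ (pvC cs p).toNat - 1)
                  + st.2 * ((2:Int) ^ (pvC cs p).toNat - 1),
             st.2 * 2 + ((2:Int) ^ (pvW 'a' cs (p + 1)).toNat - 1))) ((0:Int), (0:Int))
          = ((pvF cs).2.2, (pvF cs).2.1) := ih
      rw [hfold]
      simp [pvStep, mul_comm]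
    · have hcong : (pvBpos cs).foldl (pvMStep (cs ++ [x])) ((0:Int), (0:Int))
          = (pvBpos cs).foldl (pvMStep cs) ((0:Int), (0:Int)) := by
        apply PySem.List.foldl_congr_mem
        intro st k hk
        exact pvMStep_snoc_ne_c cs x hc st k (pvBpos_lt cs k hk)
      rw [hcong]
      have hfold : (pvBpos cs).foldl (pvMStep cs) ((0:Int), (0:Int))
          = ((pvF cs).2.2, (pvF cs).2.1) := ih
      by_cases hb : x = 'b'
      · subst hb
        rw [if_pos rfl, List.foldl_cons, List.foldl_nil, hfold]
        unfold pvMStep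
        rw [pvW_last]
        have h1 : pvInd 'a' 'b' = 0 := by unfold pvInd; simp
        have h2 : pvC (cs ++ ['b']) cs.length = 0 := by
          rw [pvC_snoc _ _ _ (le_refl _)]
          have h3 : pvC cs cs.length = 0 := by unfold pvC; simp
          have h4 : pvInd 'c' 'b' = 0 := by unfold pvInd; simp
          rw [h3, h4]
          norm_num
        rw [h1, h2, add_zero]
        have h5 : (2:Int) ^ (pvW 'a' cs cs.length).toNat - 1 = (pvF cs).1 := (pvF_fa cs).symm
        rw [h5]
        simp [pvStep, mul_comm]
      · rw [if_neg hb, List.foldl_nil, hfold]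
        have h6 : (pvStep (pvF cs) x).2.2 = (pvF cs).2.2 ∧ (pvStep (pvF cs) x).2.1 = (pvF cs).2.1 := by
          unfold pvStep
          split_ifs <;> simp_all
        rw [h6.1, h6.2]

-- ===== VERDICT (by name: the statement is the Claim_ definition above) =====
theorem solve_spec : Claim_equal_solve := by
  intro s _
  unfold Spec_solve
  rw [solve_eq_loop, pvLoop_eq]
  rfl
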